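-- pv_equiv track=rewrite | github.com/ArchitParnami/Node2KG | GraphEmbed/scripts/datafun/size_analysis.py | community_size
-- ===== SOURCE A (Python) =====
-- def community_size(communities):
--     hist = {}
--     for comm in communities:
--         comm_size = len(comm)
--         if comm_size not in hist:
--             hist[comm_size] = 1
--         else:
--             hist[comm_size] += 1
--     hist = sorted(hist.items())
--     return hist
-- ===== SOURCE B (Python) =====
-- def community_size(communities):
--     # sort-then-group-runs: no dict; one pass over the sorted sizes
--     sizes = sorted(len(comm) for comm in communities)
--     out = []
--     while sizes:
--         x = sizes[0]
--         run = 1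
--         while run < len(sizes) and sizes[run] == x:
--             run += 1
--         out.append((x, run))
--         sizes = sizes[run:]
--     return out
-- ===== Notes on version B (the rewrite author's own statement) =====
-- stated objective: alternative
-- what changed: Replaces the hash-table histogram followed by sorting the distinct (size, count) items with sorting the size list once and emitting run-length groups in a single scan, maintaining no dict.
import Mathlib
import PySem

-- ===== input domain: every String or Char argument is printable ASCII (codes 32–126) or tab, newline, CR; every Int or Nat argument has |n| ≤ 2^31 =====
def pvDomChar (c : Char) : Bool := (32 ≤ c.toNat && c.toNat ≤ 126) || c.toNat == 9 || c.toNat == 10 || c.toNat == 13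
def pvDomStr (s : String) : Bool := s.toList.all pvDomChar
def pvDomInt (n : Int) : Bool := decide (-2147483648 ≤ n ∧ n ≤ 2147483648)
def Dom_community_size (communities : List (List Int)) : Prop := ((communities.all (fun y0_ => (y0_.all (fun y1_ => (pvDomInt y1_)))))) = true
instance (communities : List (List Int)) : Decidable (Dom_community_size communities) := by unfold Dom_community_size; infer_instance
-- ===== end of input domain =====

-- B replaces A's dict histogram + sort of distinct items by sorting the sizes once and
-- emitting run-length groups in a single scan (no dict); objective: alternative algorithm.


-- ===== PORT A =====
def community_size (communities : List (List Int)) : List (Int × Int) :=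
  let hist : PySem.Dict Int Int := communities.foldl
    (fun hist comm =>
      let comm_size : Int := comm.length
      if hist.contains comm_size = false then
        hist.insert comm_size 1
      else
        hist.insert comm_size (hist.getD comm_size 0 + 1))
    PySem.Dict.empty
  PySem.List.sorted2 hist.items (fun p => p.1) (fun p => p.2)

-- ===== PORT B =====
-- the 'while sizes:' loop of Source B: run = 1 + length of the prefix of the tail equal to the
-- head (the inner while), then recurse on sizes[run:] (= rest.drop run-1)
def pvGroupRuns : List Int → List (Int × Int)
  | [] => []
  | x :: rest =>
    let run : Nat := 1 + (rest.takeWhile (fun y => y == x)).length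
    (x, (run : Int)) :: pvGroupRuns (rest.drop (run - 1))
termination_by l => l.length
decreasing_by
  simp only [List.length_cons, List.length_drop]
  omega

def community_size_alt (communities : List (List Int)) : List (Int × Int) :=
  pvGroupRuns (PySem.List.sorted (communities.map (fun comm => (comm.length : Int))) (fun s => s))

-- ===== PRECONDITION & SPEC =====
def Spec_community_size (communities : List (List Int)) (out : List (Int × Int)) : Prop := out = community_size_alt communities
instance (communities : List (List Int)) (out : List (Int × Int)) : Decidable (Spec_community_size communities out) := by unfold Spec_community_size; infer_instance

-- ===== CLAIM (what is proved, stated in full; the proofs are below) =====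
def Claim_equal_community_size : Prop := ∀ (communities : List (List Int)), Dom_community_size communities → Spec_community_size communities (community_size communities)

-- ===== LEMMAS AND PROOFS =====

-- the canonical value both ports compute: distinct sizes in increasing order, with counts
def pvCanon (sizes : List Int) : List (Int × Int) :=
  (PySem.List.sorted (PySem.Set.ofList sizes) (fun x => x)).map (fun k => (k, (sizes.count k : Int)))

lemma pvInsertBy_cons (b : Int × Int → Int × Int → Bool) (x y : Int × Int) (ys : List (Int × Int)) :
    PySem.List.insertBy b x (y :: ys)
      = if b x y then x :: y :: ys else y :: PySem.List.insertBy b x ys := rfl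

lemma pvInsertBy_congr (b1 b2 : Int × Int → Int × Int → Bool) (x : Int × Int) (ys : List (Int × Int))
    (h : ∀ a ∈ x :: ys, ∀ c ∈ x :: ys, b1 a c = b2 a c) :
    PySem.List.insertBy b1 x ys = PySem.List.insertBy b2 x ys := by
  induction ys with
  | nil => rfl
  | cons y ys ih =>
    have h' : ∀ a ∈ x :: ys, ∀ c ∈ x :: ys, b1 a c = b2 a c := by
      intro a ha c hc
      refine h a ?_ c ?_
      · rcases List.mem_cons.mp ha with h0 | h0 <;> simp [h0]
      · rcases List.mem_cons.mp hc with h0 | h0 <;> simp [h0]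
    rw [pvInsertBy_cons, pvInsertBy_cons, h x (by simp) y (by simp), ih h']

lemma pvFoldl_insertBy_congr (b1 b2 : Int × Int → Int × Int → Bool) (L : List (Int × Int))
    (h : ∀ a ∈ L, ∀ c ∈ L, b1 a c = b2 a c) :
    ∀ (xs acc : List (Int × Int)), (∀ a ∈ xs, a ∈ L) → (∀ a ∈ acc, a ∈ L) →
      xs.foldl (fun acc x => PySem.List.insertBy b1 x acc) acc
        = xs.foldl (fun acc x => PySem.List.insertBy b2 x acc) acc := by
  intro xs
  induction xs with
  | nil => intro acc _ _; rfl
  | cons x xs ih =>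
    intro acc hxs hacc
    simp only [List.foldl_cons]
    have hmem : ∀ a ∈ x :: acc, a ∈ L := by
      intro a ha; rcases List.mem_cons.mp ha with h | h
      · exact h ▸ hxs x (by simp)
      · exact hacc a h
    rw [pvInsertBy_congr b1 b2 x acc (fun a ha c hc => h a (hmem a ha) c (hmem c hc))]
    exact ih _ (fun a ha => hxs a (by simp [ha]))
      (fun a ha => hmem a ((PySem.List.insertBy_perm b2 x acc).mem_iff.mp ha))

-- sorted with a tuple key collapses to sorted on the first key when the first keys are
-- distinct on the list
lemma pvSorted2_eq_sorted (xs : List (Int × Int))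
    (h : ∀ a ∈ xs, ∀ c ∈ xs, a.1 = c.1 → a = c) :
    PySem.List.sorted2 xs (fun p => p.1) (fun p => p.2)
      = PySem.List.sorted xs (fun p => p.1) := by
  rw [PySem.List.sorted_eq_foldl_insertBy]
  show xs.foldl (fun acc x => PySem.List.insertBy
      (fun a c => decide (a.1 < c.1) || (!decide (c.1 < a.1) && decide (a.2 < c.2))) x acc) []
    = _
  apply pvFoldl_insertBy_congr _ _ xs _ xs [] (fun a ha => ha) (by simp)
  intro a ha c hc
  by_cases h1 : a.1 < c.1
  · simp [h1]
  · by_cases h2 : c.1 < a.1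
    · simp [h1, h2]
    · have : a = c := h a ha c hc (le_antisymm (not_lt.mp h2) (not_lt.mp h1))
      subst this
      simp [h2]  -- after subst the two lex components collapse

lemma pvA_eq_canon (communities : List (List Int)) :
    community_size communities = pvCanon (communities.map (fun comm => (comm.length : Int))) := by
  have hbody : ∀ (d : PySem.Dict Int Int) (s : Int),
      (if d.contains s = false then d.insert s 1 else d.insert s (d.getD s 0 + 1))
        = d.insert s (d.getD s 0 + 1) := by
    intro d s
    by_cases hc : d.contains s = false
    · rw [if_pos hc, PySem.Dict.getD_of_not_contains _ (0 : Int) hc]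
      norm_num
    · rw [if_neg hc]
  have hfold : communities.foldl
      (fun hist comm =>
        let comm_size : Int := comm.length
        if hist.contains comm_size = false then hist.insert comm_size 1
        else hist.insert comm_size (hist.getD comm_size 0 + 1))
      PySem.Dict.empty
      = PySem.Dict.counter (communities.map (fun comm => (comm.length : Int))) := by
    rw [← PySem.Dict.foldl_insert_getD_add_one_eq_counter, List.foldl_map]
    exact PySem.List.foldl_congr_mem _ _ _ _ (fun acc comm _ => hbody acc comm.length)
  show PySem.List.sorted2 _ _ _ = _
  rw [hfold, PySem.Dict.items_counter]
  rw [pvSorted2_eq_sorted]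
  · apply PySem.List.sorted_eq_of_perm_of_pairwise_lt
    · exact ((PySem.List.sorted_perm _ _ _).map _)
    · exact List.pairwise_map.mpr (by
        have := PySem.List.sorted_ofList_pairwise_lt
          (communities.map (fun comm => (comm.length : Int)))
        exact this.imp (fun hab => hab))
  · intro a ha c hc h1
    rcases List.mem_map.mp ha with ⟨k1, _, rfl⟩
    rcases List.mem_map.mp hc with ⟨k2, _, rfl⟩
    simp only at h1
    rw [h1]

-- head of dropWhile fails the predicate
lemma pvDropWhile_head (p : Int → Bool) (l : List Int) (a : Int) (t : List Int)
    (h : List.dropWhile p l = a :: t) : p a = false := by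
  induction l with
  | nil => simp at h
  | cons y ys ih =>
    rw [List.dropWhile_cons] at h
    by_cases hy : p y
    · simp [hy] at h; exact ih h
    · simp [hy] at h
      rw [← h.1]
      exact eq_false_of_ne_true hy

lemma pvDropWhile_eq_drop (p : Int → Bool) (l : List Int) :
    List.dropWhile p l = l.drop (List.takeWhile p l).length := by
  have h2 : List.drop (List.takeWhile p l).length
      (List.takeWhile p l ++ List.dropWhile p l) = List.dropWhile p l := List.drop_left
  rw [← h2, List.takeWhile_append_dropWhile]

lemma pvGroupRuns_eq_aux : ∀ (n : Nat) (l : List Int), l.length ≤ n →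
    l.Pairwise (· ≤ ·) → pvGroupRuns l = pvCanon l := by
  intro n
  induction n with
  | zero =>
    intro l hl _
    have hnil : l = [] := List.eq_nil_of_length_eq_zero (Nat.le_zero.mp hl)
    subst hnil
    rw [pvGroupRuns]
    rfl
  | succ n ihn =>
    intro l hl hp
    cases l with
    | nil => rw [pvGroupRuns]; rfl
    | cons x rest =>
      obtain ⟨h1, h2⟩ := List.pairwise_cons.mp hp
      obtain ⟨t, ht⟩ : ∃ t, t = List.takeWhile (fun y => y == x) rest := ⟨_, rfl⟩
      obtain ⟨d, hd0⟩ : ∃ d, d = List.dropWhile (fun y => y == x) rest := ⟨_, rfl⟩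
      have hrest : t ++ d = rest := by
        rw [ht, hd0]; exact List.takeWhile_append_dropWhile
      have htx : ∀ y ∈ t, y = x := by
        intro y hy
        rw [ht] at hy
        simpa using List.mem_takeWhile_imp hy
      have hdpair : d.Pairwise (· ≤ ·) := by
        rw [hd0]; exact h2.sublist (List.dropWhile_sublist _)
      have hdsub : ∀ y ∈ d, y ∈ rest := by
        intro y hy
        rw [hd0] at hy
        exact (List.dropWhile_sublist _).subset hy
      have hlt : ∀ y ∈ d, x < y := by
        intro y hy
        cases hdc : d with
        | nil => rw [hdc] at hy; simp at hy
        | cons z d' =>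
          rw [hdc] at hy
          have hz : (z == x) = false := pvDropWhile_head _ rest z d' (by rw [← hd0]; exact hdc)
          have hzx : z ≠ x := by simpa using hz
          have hzd : z ∈ d := by rw [hdc]; exact List.mem_cons_self
          have hxz : x < z := lt_of_le_of_ne (h1 z (hdsub z hzd)) (Ne.symm hzx)
          rcases List.mem_cons.mp hy with rfl | hy'
          · exact hxz
          · have hpair' : (z :: d').Pairwise (· ≤ ·) := by rw [← hdc]; exact hdpair
            exact lt_of_lt_of_le hxz ((List.pairwise_cons.mp hpair').1 y hy')
      have hxd : x ∉ d := fun hx => lt_irrefl x (hlt x hx)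
      have htcount : t.count x = t.length := List.count_eq_length.mpr (fun b hb => (htx b hb).symm)
      have hdcount : d.count x = 0 := List.count_eq_zero.mpr hxd
      have hc1 : (x :: rest).count x = t.length + 1 := by
        rw [List.count_cons_self, ← hrest, List.count_append, htcount, hdcount]
      have hc2 : ∀ k ∈ d, (x :: rest).count k = d.count k := by
        intro k hk
        have hkx : k ≠ x := ne_of_gt (hlt k hk)
        have htk : t.count k = 0 := List.count_eq_zero.mpr (fun hkt => hkx (htx k hkt))
        rw [List.count_cons_of_ne (Ne.symm hkx), ← hrest, List.count_append, htk, Nat.zero_add]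
      have hS : PySem.List.sorted (PySem.Set.ofList (x :: rest)) (fun v => v)
          = x :: PySem.List.sorted (PySem.Set.ofList d) (fun v => v) := by
        apply PySem.List.sorted_eq_of_perm_of_pairwise_lt
        · have hsp : (PySem.List.sorted (PySem.Set.ofList d) (fun v => v)).Perm
              (PySem.Set.ofList d) := PySem.List.sorted_perm _ _ _
          have hnd2 : (x :: PySem.List.sorted (PySem.Set.ofList d) (fun v => v)).Nodup := by
            refine List.nodup_cons.mpr ⟨?_, hsp.nodup_iff.mpr (PySem.Set.nodup_ofList _)⟩
            intro hx
            exact hxd ((PySem.Set.mem_ofList _ _).mp (hsp.mem_iff.mp hx))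
          rw [List.perm_ext_iff_of_nodup hnd2 (PySem.Set.nodup_ofList _)]
          intro a
          rw [List.mem_cons, PySem.List.mem_sorted, PySem.Set.mem_ofList, PySem.Set.mem_ofList]
          constructor
          · rintro (rfl | hd)
            · exact List.mem_cons_self
            · exact List.mem_cons.mpr (Or.inr (hdsub a hd))
          · intro hr
            rcases List.mem_cons.mp hr with rfl | hr'
            · exact Or.inl rfl
            · rcases List.mem_append.mp (by rw [hrest]; exact hr') with hta | hda
              · exact Or.inl (htx a hta)
              · exact Or.inr hda
        · refine List.pairwise_cons.mpr ⟨?_, PySem.List.sorted_ofList_pairwise_lt d⟩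
          intro y hy
          exact hlt y ((PySem.Set.mem_ofList _ _).mp ((PySem.List.mem_sorted _ _ _ _).mp hy))
      rw [pvGroupRuns]
      simp only [Nat.add_sub_cancel_left, ← ht]
      rw [show List.drop t.length rest = d from by rw [hd0, pvDropWhile_eq_drop, ← ht]]
      have hdlen : d.length ≤ n := by
        have h1' : d.length ≤ rest.length := by
          rw [hd0]; exact (List.dropWhile_sublist _).length_le
        have h2' : rest.length + 1 ≤ n + 1 := by simpa using hl
        omega
      rw [ihn d hdlen hdpair]
      show (x, ((1 + t.length : Nat) : Int)) :: pvCanon d = pvCanon (x :: rest)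
      unfold pvCanon
      rw [hS, List.map_cons]
      congr 1
      · rw [hc1, Nat.add_comm t.length 1]
      · apply List.map_congr_left
        intro k hk
        rw [hc2 k ((PySem.Set.mem_ofList _ _).mp ((PySem.List.mem_sorted _ _ _ _).mp hk))]

lemma pvGroupRuns_eq (l : List Int) (h : l.Pairwise (· ≤ ·)) :
    pvGroupRuns l = pvCanon l := pvGroupRuns_eq_aux l.length l le_rfl h

lemma pvB_eq_canon (communities : List (List Int)) :
    community_size_alt communities = pvCanon (communities.map (fun comm => (comm.length : Int))) := by
  unfold community_size_alt
  have hp : (PySem.List.sorted (communities.map (fun comm => (comm.length : Int)))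
      (fun s => s)).Perm (communities.map (fun comm => (comm.length : Int))) :=
    PySem.List.sorted_perm _ _ _
  rw [pvGroupRuns_eq _ ((PySem.List.sorted_pairwise
    (communities.map (fun comm => (comm.length : Int))) (fun s => s)).imp (fun hab => hab))]
  unfold pvCanon
  have hof : (PySem.Set.ofList (PySem.List.sorted
        (communities.map (fun comm => (comm.length : Int))) (fun s => s))).Perm
      (PySem.Set.ofList (communities.map (fun comm => (comm.length : Int)))) := by
    rw [List.perm_ext_iff_of_nodup (PySem.Set.nodup_ofList _) (PySem.Set.nodup_ofList _)]
    intro a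
    rw [PySem.Set.mem_ofList, PySem.Set.mem_ofList]
    exact hp.mem_iff
  rw [PySem.List.sorted_eq_sorted_of_perm _ _ (fun v => v) (fun a b hab => hab) hof]
  exact List.map_congr_left (fun k _ => by rw [hp.count_eq])

-- ===== VERDICT (by name: the statement is the Claim_ definition above) =====
theorem community_size_spec : Claim_equal_community_size := by
  intro communities _
  show community_size communities = community_size_alt communities
  rw [pvA_eq_canon, pvB_eq_canon]
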